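-- pv_equiv track=rewrite | github.com/ATPs/xiaolongTools | WenlinTools.Python3/scripts/barcode_scripts/rescue_assembled_reads.py | aln_hamming_dist
-- ===== SOURCE A (Python) =====
-- gapChars = set('X - N'.split())
--
-- def aln_hamming_dist(seq1, seq2):
--     Ndiff = 0
--     overlapN = 0
--     for char1, char2 in zip(seq1, seq2):
--         if char1 in gapChars or char2 in gapChars:
--             continue
--         if char1 != char2:
--             Ndiff += 1
--         overlapN += 1
--     return Ndiff, overlapN
-- ===== SOURCE B (Python) =====
-- gapChars = set('X - N'.split())
--
-- def aln_hamming_dist(seq1, seq2):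
--     # Complementary counting: count gap-containing pairs and equal non-gap pairs,
--     # then derive both results by subtraction from the truncated length.
--     n = min(len(seq1), len(seq2))
--     gappy = sum(a in gapChars or b in gapChars for a, b in zip(seq1, seq2))
--     eq = sum(a == b and a not in gapChars and b not in gapChars
--              for a, b in zip(seq1, seq2))
--     overlapN = n - gappy
--     return overlapN - eq, overlapN
-- ===== Notes on version B (the rewrite author's own statement) =====
-- stated objective: alternative
-- what changed: B replaces A's single accumulator loop over mismatches and overlaps with complementary counting: it counts gap-containing pairs and equal non-gap pairs in two staged passes and derives overlapN = n - gappy and Ndiff = overlapN - eq by subtraction from the truncated length.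
import Mathlib
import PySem

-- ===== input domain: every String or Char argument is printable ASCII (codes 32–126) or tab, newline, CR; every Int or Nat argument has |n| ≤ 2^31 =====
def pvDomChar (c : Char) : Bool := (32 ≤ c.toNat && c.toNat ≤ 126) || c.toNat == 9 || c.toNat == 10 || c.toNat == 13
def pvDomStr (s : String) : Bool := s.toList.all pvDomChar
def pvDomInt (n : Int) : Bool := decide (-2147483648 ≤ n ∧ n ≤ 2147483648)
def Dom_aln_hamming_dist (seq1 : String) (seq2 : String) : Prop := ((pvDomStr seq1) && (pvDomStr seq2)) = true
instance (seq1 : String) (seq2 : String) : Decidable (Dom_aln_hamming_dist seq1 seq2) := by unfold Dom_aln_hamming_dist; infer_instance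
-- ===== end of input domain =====

-- B uses complementary counting (gap pairs and equal non-gap pairs, results by subtraction
-- from the truncated length) instead of A's single accumulator loop (objective: alternative).

-- ===== PORT A =====
-- gapChars = set('X - N'.split()) = {'X', '-', 'N'}
def gapChars : PySem.Set Char := PySem.Set.ofList ['X', '-', 'N']

-- literal port of A: one fold over zip(seq1, seq2) carrying (Ndiff, overlapN)
def aln_hamming_dist (seq1 : String) (seq2 : String) : Int × Int :=
  let st := (List.zip seq1.toList seq2.toList).foldl
    (fun (st : Int × Int) p =>
      if p.1 ∈ gapChars ∨ p.2 ∈ gapChars then st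
      else ((if p.1 ≠ p.2 then st.1 + 1 else st.1), st.2 + 1))
    (0, 0)
  (st.1, st.2)

-- ===== PORT B =====
-- B-side helpers: the two predicates of Source B's generator expressions
def gapPairP (p : Char × Char) : Bool := p.1 ∈ gapChars ∨ p.2 ∈ gapChars
def eqKeepP (p : Char × Char) : Bool := p.1 = p.2 ∧ p.1 ∉ gapChars ∧ p.2 ∉ gapChars

-- literal port of B: two staged counting passes, results by subtraction
def aln_hamming_dist_alt (seq1 : String) (seq2 : String) : Int × Int :=
  let n : Int := min seq1.toList.length seq2.toList.length
  let gappy : Int := ((List.zip seq1.toList seq2.toList).countP gapPairP : Int)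
  let eq : Int := ((List.zip seq1.toList seq2.toList).countP eqKeepP : Int)
  let overlapN := n - gappy
  (overlapN - eq, overlapN)

-- ===== PRECONDITION & SPEC =====
def Spec_aln_hamming_dist (seq1 : String) (seq2 : String) (out : Int × Int) : Prop := out = aln_hamming_dist_alt seq1 seq2
instance (seq1 : String) (seq2 : String) (out : Int × Int) : Decidable (Spec_aln_hamming_dist seq1 seq2 out) := by unfold Spec_aln_hamming_dist; infer_instance

-- ===== CLAIM =====
def Claim_equal_aln_hamming_dist : Prop := ∀ (seq1 : String) (seq2 : String), Dom_aln_hamming_dist seq1 seq2 → Spec_aln_hamming_dist seq1 seq2 (aln_hamming_dist seq1 seq2)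

-- ===== LEMMAS AND PROOFS =====

-- loop invariant: A's fold started at (d, o) lands at
-- (d + (len - gappy - eq), o + (len - gappy)), the quantities B subtracts
theorem aln_fold_inv (l : List (Char × Char)) (d o : Int) :
    l.foldl
      (fun (st : Int × Int) p =>
        if p.1 ∈ gapChars ∨ p.2 ∈ gapChars then st
        else ((if p.1 ≠ p.2 then st.1 + 1 else st.1), st.2 + 1))
      (d, o)
    = (d + ((l.length : Int) - (l.countP gapPairP : Int) - (l.countP eqKeepP : Int)),
       o + ((l.length : Int) - (l.countP gapPairP : Int))) := by
  induction l generalizing d o with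
  | nil => simp
  | cons hd tl ih =>
    rw [List.foldl_cons, List.countP_cons, List.countP_cons]
    by_cases hg : hd.1 ∈ gapChars ∨ hd.2 ∈ gapChars
    · have h1 : gapPairP hd = true := by simp [gapPairP, hg]
      have h2 : eqKeepP hd = false := by
        simp only [eqKeepP, decide_eq_false_iff_not]; tauto
      rw [if_pos hg, ih, h1, h2]
      simp only [Prod.mk.injEq, List.length_cons]
      constructor <;> (push_cast; ring)
    · have h1 : gapPairP hd = false := by simp [gapPairP, hg]
      have hng := not_or.mp hg
      by_cases he : hd.1 = hd.2
      · have h2 : eqKeepP hd = true := by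
          simp only [eqKeepP, decide_eq_true_eq]; exact ⟨he, hng.1, hng.2⟩
        rw [if_neg hg, if_neg (by simpa using he), ih, h1, h2]
        simp only [Prod.mk.injEq, List.length_cons]
        constructor <;> (push_cast; ring)
      · have h2 : eqKeepP hd = false := by
          simp only [eqKeepP, decide_eq_false_iff_not]; tauto
        rw [if_neg hg, if_pos (by simpa using he), ih, h1, h2]
        simp only [Prod.mk.injEq, List.length_cons]
        constructor <;> (push_cast; ring)

-- ===== VERDICT =====
theorem aln_hamming_dist_spec : Claim_equal_aln_hamming_dist := by
  intro seq1 seq2 _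
  unfold Spec_aln_hamming_dist aln_hamming_dist aln_hamming_dist_alt
  rw [aln_fold_inv]
  have hlen : (List.zip seq1.toList seq2.toList).length
      = min seq1.toList.length seq2.toList.length := List.length_zip
  simp [hlen]
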